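-- pv_equiv track=rewrite | github.com/MrChepe09/Competitive-Programming-Codes | Practice Codes/JAIN.py | jain
-- ===== SOURCE A (Python) =====
-- def jain(a):
--   v = ['a', 'e', 'i', 'o', 'u']
--   an = 0
--   for k in range(len(a)):
--     for g in range(k+1, len(a)):
--       z = a[k]+a[g]
--       count = 0
--       for w in v:
--         if(w in z):
--           count+=1
--       if(count==5):
--         an+=1
--   return an
-- ===== SOURCE B (Python) =====
-- def jain(a):
--     bit = {'a': 1, 'e': 2, 'i': 4, 'o': 8, 'u': 16}
--     counts = {}
--     an = 0
--     for s in a: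
--         m = 0
--         for c in s:
--             m |= bit.get(c, 0)
--         an += sum(counts.get(p, 0) for p in range(32) if (p | m) == 31)
--         counts[m] = counts.get(m, 0) + 1
--     return an
-- ===== Notes on version B (the rewrite author's own statement) =====
-- stated objective: faster
-- what changed: Instead of testing every pair by concatenating the strings and scanning for each vowel (O(n^2*L)), B makes one pass computing a 5-bit vowel mask per string and counts, for each string, the earlier masks whose bitwise OR with it covers all vowels, using a 32-bucket histogram.
import Mathlib
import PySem

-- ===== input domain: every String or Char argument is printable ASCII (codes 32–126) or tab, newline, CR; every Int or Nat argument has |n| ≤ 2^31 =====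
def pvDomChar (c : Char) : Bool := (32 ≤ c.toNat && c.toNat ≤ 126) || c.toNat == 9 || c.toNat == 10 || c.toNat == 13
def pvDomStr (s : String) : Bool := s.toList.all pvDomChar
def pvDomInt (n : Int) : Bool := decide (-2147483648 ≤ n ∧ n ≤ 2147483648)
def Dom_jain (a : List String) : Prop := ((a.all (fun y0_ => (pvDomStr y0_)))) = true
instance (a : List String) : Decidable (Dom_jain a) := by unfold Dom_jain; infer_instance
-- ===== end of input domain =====

-- B replaces A's all-pairs concatenate-and-scan with a single pass over 5-bit vowel masks
-- and a 32-bucket histogram of earlier masks (objective: faster, asymptotically).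

-- ===== PORT A =====
def jain (a : List String) : Int :=
  (PySem.List.pyRange 0 (PySem.List.len a)).foldl (fun an k =>
    (PySem.List.pyRange (k + 1) (PySem.List.len a)).foldl (fun an g =>
      let z := (PySem.List.pyGetD a k "").toList ++ (PySem.List.pyGetD a g "").toList
      let count := (["a", "e", "i", "o", "u"] : List String).foldl
        (fun count w => if PySem.Chars.isIn w.toList z then count + 1 else count) (0 : Int)
      if count = 5 then an + 1 else an) an) 0

-- ===== PORT B =====
-- bit.get(c, 0): the literal dict lookup, written as a branch chain
def vowelBit (c : Char) : Int :=
  if c = 'a' then 1 else if c = 'e' then 2 else if c = 'i' then 4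
  else if c = 'o' then 8 else if c = 'u' then 16 else 0

-- the inner 'for c in s: m |= bit.get(c, 0)'
def maskOf (cs : List Char) : Int := cs.foldl (fun m c => PySem.Int.bor m (vowelBit c)) 0

-- one iteration of B's main loop: state = (an, counts)
def stepB (st : Int × PySem.Dict Int Int) (s : String) : Int × PySem.Dict Int Int :=
  let m := maskOf s.toList
  let add := ((PySem.List.pyRange 0 32).map
    (fun p => if PySem.Int.bor p m = 31 then st.2.getD p 0 else 0)).sum
  (st.1 + add, st.2.modify m 0 (· + 1))

def jain_alt (a : List String) : Int :=
  (a.foldl stepB ((0 : Int), PySem.Dict.empty)).1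

-- ===== PRECONDITION & SPEC =====
def Spec_jain (a : List String) (out : Int) : Prop := out = jain_alt a
instance (a : List String) (out : Int) : Decidable (Spec_jain a out) := by unfold Spec_jain; infer_instance

-- ===== CLAIM (what is proved, stated in full; the proofs are below) =====
def Claim_equal_jain : Prop := ∀ (a : List String), Dom_jain a → Spec_jain a (jain a)

-- ===== LEMMAS AND PROOFS =====

-- a vowel mask written out by its five bits
def bits (b1 b2 b3 b4 b5 : Bool) : Int :=
  PySem.Int.bor (cond b1 1 0) (PySem.Int.bor (cond b2 2 0)
    (PySem.Int.bor (cond b3 4 0) (PySem.Int.bor (cond b4 8 0) (cond b5 16 0))))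

-- the pair predicate both programs compute
def goodb (s t : String) : Bool :=
  decide (PySem.Int.bor (maskOf s.toList) (maskOf t.toList) = 31)

-- structural pair count: the common reference both programs are reduced to
def SA : List String → Int
  | [] => 0
  | x :: t => (t.countP (fun y => goodb x y) : Int) + SA t

def msk (s : String) : Int := maskOf s.toList

def T (a : List String) : Int :=
  ((List.range a.length).map
    (fun k => (((a.drop (k + 1)).countP (fun y => goodb (a.getD k "") y) : Nat) : Int))).sum

def G (pref rest : List String) : Int :=
  (rest.map (fun t => ((pref.countP (fun s => goodb s t) : Nat) : Int))).sum

lemma step_bits (c : Char) (b1 b2 b3 b4 b5 : Bool) :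
    PySem.Int.bor (bits b1 b2 b3 b4 b5) (vowelBit c) =
    bits (b1 || decide (c = 'a')) (b2 || decide (c = 'e')) (b3 || decide (c = 'i'))
         (b4 || decide (c = 'o')) (b5 || decide (c = 'u')) := by
  unfold vowelBit
  split_ifs with h1 h2 h3 h4 h5 <;>
    simp_all <;> revert b1 b2 b3 b4 b5 <;> decide

lemma maskOf_run (z : List Char) : ∀ b1 b2 b3 b4 b5 : Bool,
    z.foldl (fun m c => PySem.Int.bor m (vowelBit c)) (bits b1 b2 b3 b4 b5) =
    bits (b1 || decide ('a' ∈ z)) (b2 || decide ('e' ∈ z)) (b3 || decide ('i' ∈ z))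
         (b4 || decide ('o' ∈ z)) (b5 || decide ('u' ∈ z)) := by
  induction z with
  | nil => simp
  | cons c z ih =>
    intro b1 b2 b3 b4 b5
    have e : ∀ v : Char, decide (v = c ∨ v ∈ z) = (decide (c = v) || decide (v ∈ z)) := by
      intro v; by_cases h : c = v <;> by_cases h2 : v ∈ z <;> simp [h, h2, eq_comm]
    simp [List.foldl_cons, step_bits, ih, List.mem_cons, e, Bool.or_assoc]

lemma mask_char (z : List Char) :
    maskOf z = bits (decide ('a' ∈ z)) (decide ('e' ∈ z)) (decide ('i' ∈ z))
      (decide ('o' ∈ z)) (decide ('u' ∈ z)) := by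
  have h := maskOf_run z false false false false false
  simpa [maskOf, bits] using h

lemma bits_bounds : ∀ b1 b2 b3 b4 b5 : Bool, 0 ≤ bits b1 b2 b3 b4 b5 ∧ bits b1 b2 b3 b4 b5 < 32 := by decide

lemma mask_bounds (z : List Char) : 0 ≤ maskOf z ∧ maskOf z < 32 := by
  rw [mask_char z]; exact bits_bounds _ _ _ _ _

lemma count_eq_five (z : List Char) :
    ((["a", "e", "i", "o", "u"] : List String).foldl
      (fun count w => if PySem.Chars.isIn w.toList z then count + 1 else count) (0 : Int) = 5)
    ↔ ('a' ∈ z ∧ 'e' ∈ z ∧ 'i' ∈ z ∧ 'o' ∈ z ∧ 'u' ∈ z) := by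
  have e : ∀ (c : Char), (PySem.Chars.isIn [c] z = true) ↔ c ∈ z := by
    intro c; rw [PySem.Chars.isIn_iff_infix]; exact List.singleton_infix_iff c z
  have ta : ("a" : String).toList = ['a'] := rfl
  have te : ("e" : String).toList = ['e'] := rfl
  have ti : ("i" : String).toList = ['i'] := rfl
  have to' : ("o" : String).toList = ['o'] := rfl
  have tu : ("u" : String).toList = ['u'] := rfl
  simp only [List.foldl_cons, List.foldl_nil, ta, te, ti, to', tu]
  by_cases h1 : 'a' ∈ z <;> by_cases h2 : 'e' ∈ z <;> by_cases h3 : 'i' ∈ z <;>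
    by_cases h4 : 'o' ∈ z <;> by_cases h5 : 'u' ∈ z <;>
    simp [(e _).mpr, h1, h2, h3, h4, h5, e]

set_option maxHeartbeats 1000000 in
lemma bits_or_full : ∀ x1 x2 x3 x4 x5 y1 y2 y3 y4 y5 : Bool,
    (PySem.Int.bor (bits x1 x2 x3 x4 x5) (bits y1 y2 y3 y4 y5) = 31) ↔
    ((x1 || y1) && (x2 || y2) && (x3 || y3) && (x4 || y4) && (x5 || y5)) = true := by
  decide

lemma good_iff (s t : String) :
    (((["a", "e", "i", "o", "u"] : List String).foldl
      (fun count w => if PySem.Chars.isIn w.toList (s.toList ++ t.toList) then count + 1 else count)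
      (0 : Int) = 5))
    ↔ goodb s t = true := by
  rw [count_eq_five]
  unfold goodb
  rw [mask_char, mask_char, decide_eq_true_iff, bits_or_full]
  simp [List.mem_append, and_assoc]

lemma inner_eq (a : List String) (k : Int) (hk : 0 ≤ k) (an : Int) :
    (PySem.List.pyRange (k + 1) (PySem.List.len a)).foldl (fun an g =>
      let z := (PySem.List.pyGetD a k "").toList ++ (PySem.List.pyGetD a g "").toList
      let count := (["a", "e", "i", "o", "u"] : List String).foldl
        (fun count w => if PySem.Chars.isIn w.toList z then count + 1 else count) (0 : Int)
      if count = 5 then an + 1 else an) an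
    = an + (((a.drop (k + 1).toNat).countP (fun y => goodb (PySem.List.pyGetD a k "") y) : Nat) : Int) := by
  rw [PySem.List.foldl_pyRange_pyGetD a "" (fun an t =>
      if (["a", "e", "i", "o", "u"] : List String).foldl
        (fun count w => if PySem.Chars.isIn w.toList ((PySem.List.pyGetD a k "").toList ++ t.toList) then count + 1 else count) (0 : Int) = 5
      then an + 1 else an) an (by omega)]
  have h2 := PySem.List.foldl_ite_add_one (fun t =>
      (["a", "e", "i", "o", "u"] : List String).foldl
        (fun count w => if PySem.Chars.isIn w.toList ((PySem.List.pyGetD a k "").toList ++ t.toList) then count + 1 else count) (0 : Int) = 5)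
      (List.drop (k + 1).toNat a) an
  rw [h2]
  congr 2
  apply List.countP_congr
  intro y _
  simp only [good_iff, Bool.decide_eq_true]

lemma jain_eq_T (a : List String) : jain a = T a := by
  unfold jain
  rw [PySem.List.foldl_congr_mem _ _ (fun an k =>
      an + (((a.drop (k + 1).toNat).countP (fun y => goodb (PySem.List.pyGetD a k "") y) : Nat) : Int)) 0
    (by intro acc x hx
        exact inner_eq a x (by exact (PySem.List.mem_pyRange_one.mp hx).1) acc)]
  rw [PySem.List.foldl_add]
  have hlen : PySem.List.len a = ((a.length : Nat) : Int) := rfl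
  rw [hlen, PySem.List.pyRange_zero_natCast, List.map_map]
  have hmap : List.map
      ((fun k => ((List.countP (fun y => goodb (PySem.List.pyGetD a k "") y) (List.drop (k + 1).toNat a) : Nat) : Int)) ∘ fun k : Nat => (k : Int))
      (List.range a.length)
      = List.map (fun k => (((a.drop (k + 1)).countP (fun y => goodb (a.getD k "") y) : Nat) : Int)) (List.range a.length) := by
    apply List.map_congr_left
    intro k hk
    have h1 : (((k : Nat) : Int) + 1).toNat = k + 1 := by omega
    simp [PySem.List.pyGetD_natCast, h1]
  rw [hmap]
  simp [T]

lemma T_eq_SA (a : List String) : T a = SA a := by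
  induction a with
  | nil => simp [T, SA]
  | cons x t ih =>
    unfold T SA
    rw [show (x :: t).length = t.length + 1 from rfl, List.range_succ_eq_map]
    rw [List.map_cons, List.map_map, List.sum_cons]
    have hmap : List.map
        ((fun k => ((((x :: t).drop (k + 1)).countP (fun y => goodb ((x :: t).getD k "") y) : Nat) : Int)) ∘ Nat.succ)
        (List.range t.length)
        = List.map (fun k => (((t.drop (k + 1)).countP (fun y => goodb (t.getD k "") y) : Nat) : Int)) (List.range t.length) := by
      apply List.map_congr_left
      intro k hk
      simp [Function.comp, Nat.succ_eq_add_one, List.drop_succ_cons]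
    rw [hmap]
    rw [← T, ih]
    simp

lemma counter_append (l : List Int) (x : Int) :
    PySem.Dict.counter (l ++ [x]) = (PySem.Dict.counter l).modify x 0 (· + 1) := by
  rw [PySem.Dict.counter_eq_foldl, PySem.Dict.counter_eq_foldl, List.foldl_append]
  rfl

lemma sum_single (Q : Int → Prop) [DecidablePred Q] (x : Int) :
    ∀ l : List Int, l.Nodup → x ∈ l →
    ((l.map (fun p => if Q p then (if p = x then (1 : Int) else 0) else 0)).sum
      = if Q x then 1 else 0) := by
  intro l
  induction l with
  | nil => intro _ h; cases h
  | cons y l ih =>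
    intro hnd hmem
    rw [List.map_cons, List.sum_cons]
    rcases List.mem_cons.mp hmem with h | h
    · subst h
      have hz : ∀ p ∈ l, (if Q p then (if p = x then (1 : Int) else 0) else 0) = 0 := by
        intro p hp
        have : p ≠ x := fun he => (List.nodup_cons.mp hnd).1 (he ▸ hp)
        simp [this]
      have hsum : (l.map (fun p => if Q p then (if p = x then (1 : Int) else 0) else 0)).sum = 0 := by
        apply List.sum_eq_zero
        intro z hz2
        rcases List.mem_map.mp hz2 with ⟨p, hp, he⟩
        rw [← he]; exact hz p hp
      rw [hsum]
      by_cases hq : Q x <;> simp [hq]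
    · have hy : y ≠ x := fun he => (List.nodup_cons.mp hnd).1 (he ▸ h)
      rw [ih (List.nodup_cons.mp hnd).2 h]
      simp [hy]

lemma sum_range32 (Q : Int → Prop) [DecidablePred Q] :
    ∀ pref : List Int, (∀ x ∈ pref, x ∈ PySem.List.pyRange 0 32) →
    ((PySem.List.pyRange 0 32).map
      (fun p => if Q p then ((pref.count p : Nat) : Int) else 0)).sum
      = (pref.countP (fun p => decide (Q p)) : Int) := by
  intro pref
  induction pref with
  | nil => intro _; simp
  | cons x pref ih =>
    intro h
    have hx : x ∈ PySem.List.pyRange 0 32 := h x (List.mem_cons_self ..)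
    have h' : ∀ y ∈ pref, y ∈ PySem.List.pyRange 0 32 := fun y hy => h y (List.mem_cons_of_mem _ hy)
    have hsplit : ∀ p : Int, (if Q p then (((x :: pref).count p : Nat) : Int) else 0)
        = (if Q p then ((pref.count p : Nat) : Int) else 0) + (if Q p then (if p = x then (1 : Int) else 0) else 0) := by
      intro p
      by_cases hq : Q p
      · simp only [hq, if_pos]
        rw [List.count_cons]
        by_cases he : p = x
        · simp [he]
        · simp [he]
          omega
      · simp [hq]
    calc ((PySem.List.pyRange 0 32).map (fun p => if Q p then (((x :: pref).count p : Nat) : Int) else 0)).sum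
        = ((PySem.List.pyRange 0 32).map (fun p =>
            (if Q p then ((pref.count p : Nat) : Int) else 0) + (if Q p then (if p = x then (1 : Int) else 0) else 0))).sum := by
          rw [List.map_congr_left (fun p _ => hsplit p)]
      _ = ((PySem.List.pyRange 0 32).map (fun p => if Q p then ((pref.count p : Nat) : Int) else 0)).sum
            + ((PySem.List.pyRange 0 32).map (fun p => if Q p then (if p = x then (1 : Int) else 0) else 0)).sum := by
          rw [PySem.List.sum_map_add_int]
      _ = (pref.countP (fun p => decide (Q p)) : Int) + (if Q x then 1 else 0) := by
          rw [ih h', sum_single Q x _ (PySem.List.nodup_pyRange_one ..) hx]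
      _ = ((x :: pref).countP (fun p => decide (Q p)) : Int) := by
          rw [List.countP_cons]
          by_cases hq : Q x <;> simp [hq]

lemma G_append (pref rest : List String) (x : String) :
    G (pref ++ [x]) rest = G pref rest + ((rest.countP (fun t => goodb x t) : Nat) : Int) := by
  unfold G
  have hpt : ∀ t : String, (((pref ++ [x]).countP (fun s => goodb s t) : Nat) : Int)
      = ((pref.countP (fun s => goodb s t) : Nat) : Int) + (if goodb x t then (1 : Int) else 0) := by
    intro t
    rw [List.countP_append]
    by_cases h : goodb x t <;> simp [h]
  rw [List.map_congr_left (fun t _ => hpt t), PySem.List.sum_map_add_int,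
    PySem.List.sum_map_ite_one_zero]

lemma mem_range32_of_msk (s : String) : msk s ∈ PySem.List.pyRange 0 32 := by
  rcases mask_bounds s.toList with ⟨h1, h2⟩
  exact PySem.List.mem_pyRange_one.mpr ⟨h1, h2⟩

lemma loopB : ∀ (rest : List String) (ans : Int) (pref : List String),
    (rest.foldl stepB (ans, PySem.Dict.counter (pref.map msk))).1
      = ans + G pref rest + SA rest := by
  intro rest
  induction rest with
  | nil => intro ans pref; simp [G, SA]
  | cons x rest ih =>
    intro ans pref
    rw [List.foldl_cons]
    have hstep : stepB (ans, PySem.Dict.counter (pref.map msk)) x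
        = (ans + ((pref.countP (fun s => goodb s x) : Nat) : Int),
           PySem.Dict.counter ((pref ++ [x]).map msk)) := by
      unfold stepB
      have hadd : (List.map (fun p => if PySem.Int.bor p (maskOf x.toList) = 31
            then (PySem.Dict.counter (pref.map msk)).getD p 0 else 0) (PySem.List.pyRange 0 32)).sum
          = ((pref.countP (fun s => goodb s x) : Nat) : Int) := by
        have hpt : ∀ p ∈ PySem.List.pyRange 0 32, (if PySem.Int.bor p (maskOf x.toList) = 31
            then (PySem.Dict.counter (pref.map msk)).getD p 0 else 0)
            = (if PySem.Int.bor p (maskOf x.toList) = 31 then (((pref.map msk).count p : Nat) : Int) else 0) := by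
          intro p _
          rw [PySem.Dict.getD_counter]
        rw [List.map_congr_left hpt]
        rw [sum_range32 (fun p => PySem.Int.bor p (maskOf x.toList) = 31) (pref.map msk)
          (fun y hy => by rcases List.mem_map.mp hy with ⟨s, _, he⟩; exact he ▸ mem_range32_of_msk s)]
        rw [List.countP_map]
        rfl
      have hmod : (PySem.Dict.counter (pref.map msk)).modify (maskOf x.toList) 0 (· + 1)
          = PySem.Dict.counter ((pref ++ [x]).map msk) := by
        rw [List.map_append, show List.map msk [x] = [msk x] from rfl, counter_append]
        rfl
      simp only []
      rw [hadd, hmod]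
    rw [hstep, ih]
    rw [G_append]
    have hG : G pref (x :: rest) = ((pref.countP (fun s => goodb s x) : Nat) : Int) + G pref rest := by
      unfold G; rw [List.map_cons, List.sum_cons]
    rw [hG, SA]
    ring

lemma alt_eq_SA (a : List String) : jain_alt a = SA a := by
  unfold jain_alt
  rw [show (PySem.Dict.empty : PySem.Dict Int Int) = PySem.Dict.counter (([] : List String).map msk) from rfl,
    loopB]
  simp [G]

-- ===== VERDICT (by name: the statement is the Claim_ definition above) =====
theorem jain_spec : Claim_equal_jain := by
  intro a _
  unfold Spec_jain
  rw [jain_eq_T, T_eq_SA, alt_eq_SA]
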